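-- pv_equiv track=rewrite | github.com/vini0894/raga-focus-dashboard | pipeline/discover_thumbnail_hooks.py | _classify_problem_bucket
-- ===== SOURCE A (Python) =====
-- def _classify_problem_bucket(phrase: str) -> str:
--     """Tag a hook with the problem bucket it likely belongs to."""
--     p = phrase.lower()
--     if any(t in p for t in ["overthink", "racing", "thoughts", "mind racing"]):
--         return "overthinking"
--     if any(t in p for t in ["anxiety", "anxious", "panic", "nervous"]):
--         return "anxiety"
--     if any(t in p for t in ["sleep", "asleep", "insomnia"]):
--         return "sleep"
--     if any(t in p for t in ["stress", "burnt out", "burnout", "burned"]):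
--         return "stress"
--     if any(t in p for t in ["rest", "exhausted", "depleted", "tired"]):
--         return "rest"
--     if any(t in p for t in ["meditation", "meditate", "stillness"]):
--         return "meditation"
--     if any(t in p for t in ["unwind", "switch off", "wind down"]):
--         return "unwind"
--     if any(t in p for t in ["dopamine", "overstimulated"]):
--         return "dopamine"
--     if any(t in p for t in ["heart", "grief", "emotional"]):
--         return "emotional"
--     if any(t in p for t in ["morning", "wake", "cortisol"]):
--         return "morning"
--     if any(t in p for t in ["fog", "brain fog", "clarity"]):
--         return "anxiety"  # brain fog → anxiety bucket for thumbnails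
--     if any(t in p for t in ["vagus", "polyvagal"]):
--         return "vagus"
--     if any(t in p for t in ["nervous system", "down regulate"]):
--         return "nervous system"
--     return "anxiety"  # safe default
-- ===== SOURCE B (Python) =====
-- # Flat prioritized keyword table: (keyword, priority, bucket).  Instead of an
-- # ordered cascade with early return, scan ALL keywords once and keep the match
-- # with the lowest priority (= the bucket the original's first firing branch
-- # would have chosen).
-- KEYWORD_PRIORITIES = [
--     ("overthink", 0, "overthinking"), ("racing", 0, "overthinking"),
--     ("thoughts", 0, "overthinking"), ("mind racing", 0, "overthinking"),
--     ("anxiety", 1, "anxiety"), ("anxious", 1, "anxiety"),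
--     ("panic", 1, "anxiety"), ("nervous", 1, "anxiety"),
--     ("sleep", 2, "sleep"), ("asleep", 2, "sleep"), ("insomnia", 2, "sleep"),
--     ("stress", 3, "stress"), ("burnt out", 3, "stress"),
--     ("burnout", 3, "stress"), ("burned", 3, "stress"),
--     ("rest", 4, "rest"), ("exhausted", 4, "rest"),
--     ("depleted", 4, "rest"), ("tired", 4, "rest"),
--     ("meditation", 5, "meditation"), ("meditate", 5, "meditation"),
--     ("stillness", 5, "meditation"),
--     ("unwind", 6, "unwind"), ("switch off", 6, "unwind"),
--     ("wind down", 6, "unwind"),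
--     ("dopamine", 7, "dopamine"), ("overstimulated", 7, "dopamine"),
--     ("heart", 8, "emotional"), ("grief", 8, "emotional"),
--     ("emotional", 8, "emotional"),
--     ("morning", 9, "morning"), ("wake", 9, "morning"),
--     ("cortisol", 9, "morning"),
--     ("fog", 10, "anxiety"), ("brain fog", 10, "anxiety"),
--     ("clarity", 10, "anxiety"),  # brain fog → anxiety bucket for thumbnails
--     ("vagus", 11, "vagus"), ("polyvagal", 11, "vagus"),
--     ("nervous system", 12, "nervous system"),
--     ("down regulate", 12, "nervous system"),
-- ]
--
--
-- def _classify_problem_bucket(phrase: str) -> str: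
--     """Tag a hook with the problem bucket it likely belongs to."""
--     p = phrase.lower()
--     best = None
--     for kw, prio, bucket in KEYWORD_PRIORITIES:
--         if kw in p and (best is None or prio < best[0]):
--             best = (prio, bucket)
--     return best[1] if best is not None else "anxiety"  # safe default
-- ===== Notes on version B (the rewrite author's own statement) =====
-- stated objective: alternative
-- what changed: Replaced the ordered 13-branch early-return cascade by a single exhaustive pass over a flat (keyword, priority, bucket) table that keeps the lowest-priority match in an accumulator and returns its bucket (default 'anxiety' if nothing matched).
import Mathlib
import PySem

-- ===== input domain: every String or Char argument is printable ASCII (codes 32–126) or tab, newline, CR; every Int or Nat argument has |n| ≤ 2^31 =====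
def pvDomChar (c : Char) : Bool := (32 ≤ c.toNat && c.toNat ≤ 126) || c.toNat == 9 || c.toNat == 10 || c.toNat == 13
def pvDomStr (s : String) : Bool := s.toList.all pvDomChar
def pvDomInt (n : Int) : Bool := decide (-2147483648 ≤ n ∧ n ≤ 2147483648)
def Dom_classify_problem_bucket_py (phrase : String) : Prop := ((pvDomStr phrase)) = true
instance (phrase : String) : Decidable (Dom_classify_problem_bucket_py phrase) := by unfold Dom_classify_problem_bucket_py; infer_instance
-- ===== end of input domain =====

-- B replaces A's ordered early-return branch cascade by one exhaustive pass over a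
-- flat (keyword, priority, bucket) table keeping the lowest-priority match (objective: alternative).

-- ===== PORT A =====
def classify_problem_bucket_py (phrase : String) : String :=
  let p := PySem.Str.lower phrase
  if ["overthink", "racing", "thoughts", "mind racing"].any (fun t => PySem.Str.isIn t p) then "overthinking"
  else if ["anxiety", "anxious", "panic", "nervous"].any (fun t => PySem.Str.isIn t p) then "anxiety"
  else if ["sleep", "asleep", "insomnia"].any (fun t => PySem.Str.isIn t p) then "sleep"
  else if ["stress", "burnt out", "burnout", "burned"].any (fun t => PySem.Str.isIn t p) then "stress"
  else if ["rest", "exhausted", "depleted", "tired"].any (fun t => PySem.Str.isIn t p) then "rest"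
  else if ["meditation", "meditate", "stillness"].any (fun t => PySem.Str.isIn t p) then "meditation"
  else if ["unwind", "switch off", "wind down"].any (fun t => PySem.Str.isIn t p) then "unwind"
  else if ["dopamine", "overstimulated"].any (fun t => PySem.Str.isIn t p) then "dopamine"
  else if ["heart", "grief", "emotional"].any (fun t => PySem.Str.isIn t p) then "emotional"
  else if ["morning", "wake", "cortisol"].any (fun t => PySem.Str.isIn t p) then "morning"
  else if ["fog", "brain fog", "clarity"].any (fun t => PySem.Str.isIn t p) then "anxiety"
  else if ["vagus", "polyvagal"].any (fun t => PySem.Str.isIn t p) then "vagus"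
  else if ["nervous system", "down regulate"].any (fun t => PySem.Str.isIn t p) then "nervous system"
  else "anxiety"

-- ===== PORT B =====
-- Source B's flat KEYWORD_PRIORITIES table: (keyword, priority, bucket)
def pvTable : List (String × Int × String) :=
  [ ("overthink", 0, "overthinking"), ("racing", 0, "overthinking")
  , ("thoughts", 0, "overthinking"), ("mind racing", 0, "overthinking")
  , ("anxiety", 1, "anxiety"), ("anxious", 1, "anxiety")
  , ("panic", 1, "anxiety"), ("nervous", 1, "anxiety")
  , ("sleep", 2, "sleep"), ("asleep", 2, "sleep"), ("insomnia", 2, "sleep")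
  , ("stress", 3, "stress"), ("burnt out", 3, "stress")
  , ("burnout", 3, "stress"), ("burned", 3, "stress")
  , ("rest", 4, "rest"), ("exhausted", 4, "rest")
  , ("depleted", 4, "rest"), ("tired", 4, "rest")
  , ("meditation", 5, "meditation"), ("meditate", 5, "meditation")
  , ("stillness", 5, "meditation")
  , ("unwind", 6, "unwind"), ("switch off", 6, "unwind")
  , ("wind down", 6, "unwind")
  , ("dopamine", 7, "dopamine"), ("overstimulated", 7, "dopamine")
  , ("heart", 8, "emotional"), ("grief", 8, "emotional")
  , ("emotional", 8, "emotional")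
  , ("morning", 9, "morning"), ("wake", 9, "morning")
  , ("cortisol", 9, "morning")
  , ("fog", 10, "anxiety"), ("brain fog", 10, "anxiety")
  , ("clarity", 10, "anxiety")
  , ("vagus", 11, "vagus"), ("polyvagal", 11, "vagus")
  , ("nervous system", 12, "nervous system")
  , ("down regulate", 12, "nervous system") ]

-- Source B's loop body: keep the lowest-priority match in `best`
def pvStep (p : String) (best : Option (Int × String)) (e : String × Int × String) : Option (Int × String) :=
  match best with
  | none => if PySem.Str.isIn e.1 p then some (e.2.1, e.2.2) else none
  | some (j, b0) =>
      if PySem.Str.isIn e.1 p && decide (e.2.1 < j) then some (e.2.1, e.2.2) else some (j, b0)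

def classify_problem_bucket_py_alt (phrase : String) : String :=
  match pvTable.foldl (pvStep (PySem.Str.lower phrase)) none with
  | some (_, b) => b
  | none => "anxiety"

-- ===== PRECONDITION & SPEC =====
def Spec_classify_problem_bucket_py (phrase : String) (out : String) : Prop := out = classify_problem_bucket_py_alt phrase
instance (phrase : String) (out : String) : Decidable (Spec_classify_problem_bucket_py phrase out) := by unfold Spec_classify_problem_bucket_py; infer_instance

-- ===== CLAIM (what is proved, stated in full; the proofs are below) =====
def Claim_equal_classify_problem_bucket_py : Prop := ∀ (phrase : String), Dom_classify_problem_bucket_py phrase → Spec_classify_problem_bucket_py phrase (classify_problem_bucket_py phrase)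

-- ===== LEMMAS AND PROOFS =====

-- A's cascade, as a first-match scan over grouped rules (proof helpers)
def pvScanOpt (p : String) : List (List String × String) → Option String
  | [] => none
  | (kws, b) :: rest =>
      if kws.any (fun t => PySem.Str.isIn t p) then some b else pvScanOpt p rest

def pvScanD (p : String) : List (List String × String) → String
  | [] => "anxiety"
  | (kws, b) :: rest =>
      if kws.any (fun t => PySem.Str.isIn t p) then b else pvScanD p rest

def pvGroups : List (List String × String) :=
  [ (["overthink", "racing", "thoughts", "mind racing"], "overthinking")
  , (["anxiety", "anxious", "panic", "nervous"], "anxiety")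
  , (["sleep", "asleep", "insomnia"], "sleep")
  , (["stress", "burnt out", "burnout", "burned"], "stress")
  , (["rest", "exhausted", "depleted", "tired"], "rest")
  , (["meditation", "meditate", "stillness"], "meditation")
  , (["unwind", "switch off", "wind down"], "unwind")
  , (["dopamine", "overstimulated"], "dopamine")
  , (["heart", "grief", "emotional"], "emotional")
  , (["morning", "wake", "cortisol"], "morning")
  , (["fog", "brain fog", "clarity"], "anxiety")
  , (["vagus", "polyvagal"], "vagus")
  , (["nervous system", "down regulate"], "nervous system") ]

-- flatten grouped rules into a flat prioritized table, priorities starting at i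
def pvFlat : List (List String × String) → Int → List (String × Int × String)
  | [], _ => []
  | (kws, b) :: rest, i => (kws.map (fun k => (k, i, b))) ++ pvFlat rest (i + 1)

theorem pvTable_eq_flat : pvTable = pvFlat pvGroups 0 := by decide

theorem fold_group_some (p : String) (kws : List String) (i : Int) (b : String)
    (j : Int) (b0 : String) (h : ¬ i < j) :
    (kws.map (fun k => (k, i, b))).foldl (pvStep p) (some (j, b0)) = some (j, b0) := by
  induction kws with
  | nil => rfl
  | cons k rest ih =>
      simp only [List.map_cons, List.foldl_cons, pvStep]
      rw [if_neg (by simp [h]), ih]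

theorem fold_flat_some (p : String) (rules : List (List String × String)) (i : Int)
    (j : Int) (b0 : String) (h : j ≤ i) :
    (pvFlat rules i).foldl (pvStep p) (some (j, b0)) = some (j, b0) := by
  induction rules generalizing i with
  | nil => rfl
  | cons g rest ih =>
      obtain ⟨kws, b⟩ := g
      simp only [pvFlat, List.foldl_append]
      rw [fold_group_some p kws i b j b0 (by omega), ih (i + 1) (by omega)]

theorem fold_group_none (p : String) (kws : List String) (i : Int) (b : String) :
    (kws.map (fun k => (k, i, b))).foldl (pvStep p) none
      = if kws.any (fun t => PySem.Str.isIn t p) then some (i, b) else none := by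
  induction kws with
  | nil => rfl
  | cons k rest ih =>
      simp only [List.map_cons, List.foldl_cons, List.any_cons]
      by_cases hk : PySem.Str.isIn k p
      · simp only [pvStep, hk, if_pos]
        rw [fold_group_some p rest i b i b (lt_irrefl i)]
        simp
      · simp only [pvStep, hk, if_neg, Bool.false_eq_true, not_false_iff, ih]
        simp

theorem fold_flat_none (p : String) (rules : List (List String × String)) (i : Int) :
    ((pvFlat rules i).foldl (pvStep p) none).map Prod.snd = pvScanOpt p rules := by
  induction rules generalizing i with
  | nil => rfl
  | cons g rest ih =>
      obtain ⟨kws, b⟩ := g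
      simp only [pvFlat, List.foldl_append, pvScanOpt]
      rw [fold_group_none]
      by_cases h : kws.any (fun t => PySem.Str.isIn t p)
      · rw [if_pos h, if_pos h, fold_flat_some p rest (i + 1) i b (by omega)]
        rfl
      · rw [if_neg h, if_neg h, ih (i + 1)]

theorem scanD_eq_getD (p : String) (rules : List (List String × String)) :
    pvScanD p rules = (pvScanOpt p rules).getD "anxiety" := by
  induction rules with
  | nil => rfl
  | cons g rest ih =>
      obtain ⟨kws, b⟩ := g
      simp only [pvScanD, pvScanOpt]
      split_ifs <;> simp [ih]

theorem scan_eq_A (phrase : String) :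
    classify_problem_bucket_py phrase = pvScanD (PySem.Str.lower phrase) pvGroups := by
  rfl

-- ===== VERDICT (by name: the statement is the Claim_ definition above) =====
theorem classify_problem_bucket_py_spec : Claim_equal_classify_problem_bucket_py := by
  intro phrase _
  unfold Spec_classify_problem_bucket_py classify_problem_bucket_py_alt
  rw [scan_eq_A, scanD_eq_getD, pvTable_eq_flat,
    ← fold_flat_none (PySem.Str.lower phrase) pvGroups 0]
  cases hf : (pvFlat pvGroups 0).foldl (pvStep (PySem.Str.lower phrase)) none with
  | none => rfl
  | some v => obtain ⟨j, b⟩ := v; rfl
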